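-- pv_equiv track=rewrite | github.com/pradyumnac26/LeetcodeProblems | 3738-make-array-non-decreasing/3738-make-array-non-decreasing.py | maximumPossibleSize
-- ===== SOURCE A (Python) =====
-- from typing import List
--
-- def maximumPossibleSize(nums: List[int]) -> int:
--     # take 4 put in stack and then go to 2 see that its 2 < 4 have to do stack.pop
--     cnt = 0
--     stack = []
--     stack.append(nums[0])
--     for i in range(1, len(nums)):
--
--         if nums[i] >= stack[-1] :
--             stack.append(nums[i])
--     return len(stack)
-- ===== SOURCE B (Python) =====
-- from typing import List
--
-- def maximumPossibleSize(nums: List[int]) -> int: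
--     # brute force: an element is kept iff no earlier element exceeds it
--     cnt = 0
--     seen = []
--     for x in nums:
--         if all(y <= x for y in seen):
--             cnt += 1
--         seen.append(x)
--     return cnt
-- ===== Notes on version B (the rewrite author's own statement) =====
-- stated objective: alternative
-- what changed: B drops A's stack/running-max mechanism entirely and counts by brute force: for each element it scans all previous elements and counts it iff none exceeds it (O(n^2) pairwise test instead of A's O(n) stack).
import Mathlib
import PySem

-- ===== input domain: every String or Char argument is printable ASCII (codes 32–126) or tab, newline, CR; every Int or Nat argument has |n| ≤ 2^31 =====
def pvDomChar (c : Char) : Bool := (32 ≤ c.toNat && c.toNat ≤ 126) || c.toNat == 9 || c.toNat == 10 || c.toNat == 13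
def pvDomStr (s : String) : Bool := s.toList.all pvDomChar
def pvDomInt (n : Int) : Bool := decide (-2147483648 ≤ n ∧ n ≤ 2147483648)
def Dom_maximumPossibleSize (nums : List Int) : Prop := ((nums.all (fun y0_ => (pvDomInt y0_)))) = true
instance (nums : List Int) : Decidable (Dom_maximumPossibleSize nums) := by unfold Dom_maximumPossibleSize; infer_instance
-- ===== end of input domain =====

-- B replaces A's kept-elements stack by a brute-force pairwise test: an element is
-- counted iff no earlier element exceeds it (alternative algorithm, O(n^2) vs A's O(n)).
-- Pre_ excludes the empty list, on which A raises IndexError while B returns 0.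


-- ===== PORT A =====
def maximumPossibleSize (nums : List Int) : Int :=
  let stack : List Int := [] ++ [PySem.List.pyGetD nums 0 0]
  let stack := (PySem.List.pyRange 1 (PySem.List.len nums) 1).foldl
    (fun st i =>
      if PySem.List.pyGetD nums i 0 ≥ PySem.List.pyGetD st (-1) 0 then
        st ++ [PySem.List.pyGetD nums i 0]
      else st) stack
  (stack.length : Int)

-- ===== PORT B =====
def maximumPossibleSize_alt (nums : List Int) : Int :=
  let r := nums.foldl
    (fun (acc : Int × List Int) x =>
      (if acc.2.all (fun y => y ≤ x) then acc.1 + 1 else acc.1, acc.2 ++ [x]))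
    ((0 : Int), ([] : List Int))
  r.1

-- ===== PRECONDITION & SPEC =====
-- Pre_ excludes exactly the empty list, on which A raises IndexError at its first-element access.
def Pre_maximumPossibleSize (nums : List Int) : Prop := nums ≠ []
instance (nums : List Int) : Decidable (Pre_maximumPossibleSize nums) := by
  unfold Pre_maximumPossibleSize; infer_instance
def pvWitness_maximumPossibleSize : List Int := [4, 2, 5, 5, 3, 7]

def Spec_maximumPossibleSize (nums : List Int) (out : Int) : Prop := out = maximumPossibleSize_alt nums
instance (nums : List Int) (out : Int) : Decidable (Spec_maximumPossibleSize nums out) := by unfold Spec_maximumPossibleSize; infer_instance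

-- ===== CLAIM (what is proved, stated in full; the proofs are below) =====
def Claim_equal_maximumPossibleSize : Prop := ∀ (nums : List Int), Dom_maximumPossibleSize nums → Pre_maximumPossibleSize nums → Spec_maximumPossibleSize nums (maximumPossibleSize nums)

-- ===== LEMMAS AND PROOFS =====

-- number of running-maximum positions of t, given current maximum m
def pvCnt (m : Int) : List Int → Int
  | [] => 0
  | x :: xs => if m ≤ x then 1 + pvCnt x xs else pvCnt m xs

theorem pvA_loop (t : List Int) : ∀ (st : List Int) (h : st ≠ []),
    ((t.foldl (fun st i =>
      if i ≥ PySem.List.pyGetD st (-1) 0 then st ++ [i] else st) st).length : Int)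
    = st.length + pvCnt (st.getLast h) t := by
  induction t with
  | nil => intro st h; simp [pvCnt]
  | cons x xs ih =>
    intro st h
    simp only [List.foldl_cons, PySem.List.pyGetD_neg_one _ _ h, pvCnt]
    by_cases hx : st.getLast h ≤ x
    · rw [if_pos hx, ih (st ++ [x]) (by simp)]
      simp [if_pos hx]
      ring
    · rw [if_neg hx, if_neg hx, ih st h]

theorem pvB_loop (t : List Int) : ∀ (c : Int) (seen : List Int) (m : Int),
    m ∈ seen → (∀ y ∈ seen, y ≤ m) →
    (t.foldl (fun (acc : Int × List Int) x =>
      (if acc.2.all (fun y => y ≤ x) then acc.1 + 1 else acc.1, acc.2 ++ [x]))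
      (c, seen)).1 = c + pvCnt m t := by
  induction t with
  | nil => intro c seen m _ _; simp [pvCnt]
  | cons x xs ih =>
    intro c seen m hm hub
    simp only [List.foldl_cons, pvCnt]
    by_cases hx : m ≤ x
    · have hall : seen.all (fun y => decide (y ≤ x)) = true := by
        simp only [List.all_eq_true, decide_eq_true_eq]
        exact fun y hy => le_trans (hub y hy) hx
      rw [if_pos hx]
      simp only [hall, if_pos]
      rw [ih (c + 1) (seen ++ [x]) x (by simp) ?_]
      · ring
      · intro y hy
        rcases List.mem_append.mp hy with h | h
        · exact le_trans (hub y h) hx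
        · simp at h; omega
    · have hall : seen.all (fun y => decide (y ≤ x)) = false := by
        simp only [List.all_eq_false]
        exact ⟨m, hm, by simpa using hx⟩
      rw [if_neg hx]
      simp only [hall, Bool.false_eq_true, if_false]
      exact ih c (seen ++ [x]) m (List.mem_append.mpr (Or.inl hm))
        (fun y hy => by
          rcases List.mem_append.mp hy with h | h
          · exact hub y h
          · simp at h; omega)

-- ===== VERDICT (by name: the statement is the Claim_ definition above) =====
theorem maximumPossibleSize_spec : Claim_equal_maximumPossibleSize := by
  intro nums _ hpre
  unfold Spec_maximumPossibleSize maximumPossibleSize maximumPossibleSize_alt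
  obtain ⟨n0, t, rfl⟩ : ∃ n0 t, nums = n0 :: t := by
    cases nums with
    | nil => exact absurd rfl hpre
    | cons a l => exact ⟨a, l, rfl⟩
  simp only [List.nil_append]
  rw [PySem.List.foldl_pyRange_pyGetD (n0 :: t) 0
        (fun st v => if v ≥ PySem.List.pyGetD st (-1) 0 then st ++ [v] else st)
        [PySem.List.pyGetD (n0 :: t) 0 0] (a := 1) (by norm_num)]
  have hget0 : PySem.List.pyGetD (n0 :: t) 0 0 = n0 := by
    simp [PySem.List.pyGetD_zero_cons]
  rw [hget0]
  have hA := pvA_loop t [n0] (by simp)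
  simp only [List.getLast_singleton, List.length_cons, List.length_nil] at hA
  have hdrop : (n0 :: t).drop (1 : Int).toNat = t := by simp
  rw [hdrop, hA]
  -- B side: the first iteration counts n0 (empty seen), then pvB_loop with maximum n0
  simp only [List.foldl_cons, List.all_nil, if_pos, List.nil_append]
  rw [pvB_loop t ((0 : Int) + 1) [n0] n0 (by simp) (by simp)]
  push_cast
  ring
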